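-- pv_equiv track=rewrite | github.com/MauPos04/RAG_BIOS | src/rag_bios/document_loader.py | _build_header_names
-- ===== SOURCE A (Python) =====
-- def _build_header_names(
--     header_row: list[str],
--     data_rows: list[tuple[int, list[str]]],
-- ) -> list[str]:
--     max_columns = max(
--         [len(header_row), *[len(values) for _, values in data_rows]],
--         default=0,
--     )
--     unique_headers: list[str] = []
--     seen_headers: dict[str, int] = {}
--
--     for column_index in range(1, max_columns + 1):
--         raw_header = header_row[column_index - 1].strip() if column_index <= len(header_row) else ""
--         header_name = raw_header or f"col_{column_index}"
--         duplicate_index = seen_headers.get(header_name, 0)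
--         if duplicate_index:
--             header_name = f"{header_name}_{duplicate_index + 1}"
--         seen_headers[raw_header or f"col_{column_index}"] = duplicate_index + 1
--         unique_headers.append(header_name)
--
--     return unique_headers
-- ===== SOURCE B (Python) =====
-- def _build_header_names(
--     header_row: list[str],
--     data_rows: list[tuple[int, list[str]]],
-- ) -> list[str]:
--     max_columns = max(
--         [len(header_row), *[len(values) for _, values in data_rows]],
--         default=0,
--     )
--     bases = [
--         (header_row[i].strip() if i < len(header_row) else "") or f"col_{i + 1}"
--         for i in range(max_columns)
--     ]
--     # Bucket column indices by base name, then name each group by position within it.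
--     groups: dict[str, list[int]] = {}
--     for i, base in enumerate(bases):
--         groups.setdefault(base, []).append(i)
--     named = [
--         (i, base if k == 0 else f"{base}_{k + 1}")
--         for base, indices in groups.items()
--         for k, i in enumerate(indices)
--     ]
--     named.sort(key=lambda pair: pair[0])
--     return [name for _, name in named]
-- ===== Notes on version B (the rewrite author's own statement) =====
-- stated objective: alternative
-- what changed: Replaces A's single streaming loop (a running seen-counts dict consulted and updated at every emission) by a bucket-and-sort scheme: one pass groups all column indices into per-base-name index lists, each group is named wholesale from the position within its bucket, and the (index, name) pairs are sorted back into column order.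
import Mathlib
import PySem

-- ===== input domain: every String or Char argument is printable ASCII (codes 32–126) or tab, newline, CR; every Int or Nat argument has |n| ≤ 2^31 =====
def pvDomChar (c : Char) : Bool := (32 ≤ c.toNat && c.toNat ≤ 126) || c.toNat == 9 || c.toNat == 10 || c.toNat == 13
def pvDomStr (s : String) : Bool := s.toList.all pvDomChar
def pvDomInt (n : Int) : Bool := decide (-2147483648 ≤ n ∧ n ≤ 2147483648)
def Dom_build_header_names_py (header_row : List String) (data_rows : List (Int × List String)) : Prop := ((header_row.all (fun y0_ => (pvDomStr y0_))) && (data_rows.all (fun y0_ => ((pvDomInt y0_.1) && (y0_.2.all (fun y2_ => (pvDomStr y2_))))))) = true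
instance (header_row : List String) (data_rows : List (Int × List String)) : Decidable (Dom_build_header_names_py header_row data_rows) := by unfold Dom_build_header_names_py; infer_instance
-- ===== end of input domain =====

-- B replaces A's streaming loop (a seen-counts dict consulted and updated at every emission) by a
-- bucket-and-sort scheme: group column indices by base name, name each bucket by position within
-- it, sort the (index, name) pairs back into column order (objective: alternative; same value).

-- ===== PORT A =====
def build_header_names_py (header_row : List String) (data_rows : List (Int × List String)) : List String :=
  let max_columns : Int :=
    (PySem.List.max? (PySem.List.len header_row :: data_rows.map (fun p => PySem.List.len p.2))
      (fun x => x)).getD 0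
  let step : List String × PySem.Dict String Int → Int → List String × PySem.Dict String Int :=
    fun st column_index =>
      let raw_header : String :=
        if column_index ≤ PySem.List.len header_row then
          PySem.Str.strip (PySem.List.pyGetD header_row (column_index - 1) "")
        else ""
      let header_name : String :=
        if raw_header = "" then "col_" ++ PySem.Int.toStr column_index else raw_header
      let duplicate_index : Int := st.2.getD header_name 0
      let header_name2 : String :=
        if duplicate_index ≠ 0 then header_name ++ "_" ++ PySem.Int.toStr (duplicate_index + 1)
        else header_name
      ((st.1 ++ [header_name2]),
        st.2.insert (if raw_header = "" then "col_" ++ PySem.Int.toStr column_index else raw_header)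
          (duplicate_index + 1))
  ((PySem.List.pyRange 1 (max_columns + 1) 1).foldl step ([], PySem.Dict.empty)).1

-- ===== PORT B =====
def build_header_names_py_alt (header_row : List String) (data_rows : List (Int × List String)) : List String :=
  let max_columns : Int :=
    (PySem.List.max? (PySem.List.len header_row :: data_rows.map (fun p => PySem.List.len p.2))
      (fun x => x)).getD 0
  let bases : List String :=
    (PySem.List.pyRange 0 max_columns 1).map (fun i =>
      let s : String :=
        if i < PySem.List.len header_row then
          PySem.Str.strip (PySem.List.pyGetD header_row i "") else ""
      if s = "" then "col_" ++ PySem.Int.toStr (i + 1) else s)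
  let groups : PySem.Dict String (List Int) :=
    (PySem.List.enumerate bases 0).foldl
      (fun d p => d.modify p.2 [] (fun l => l ++ [p.1])) PySem.Dict.empty
  let named : List (Int × String) :=
    groups.items.flatMap (fun bp =>
      (PySem.List.enumerate bp.2 0).map (fun q =>
        (q.2, if q.1 = 0 then bp.1 else bp.1 ++ "_" ++ PySem.Int.toStr (q.1 + 1))))
  (PySem.List.sorted named (fun pair => pair.1) false).map (fun p => p.2)

-- ===== PRECONDITION & SPEC =====
def Spec_build_header_names_py (header_row : List String) (data_rows : List (Int × List String)) (out : List String) : Prop := out = build_header_names_py_alt header_row data_rows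
instance (header_row : List String) (data_rows : List (Int × List String)) (out : List String) : Decidable (Spec_build_header_names_py header_row data_rows out) := by unfold Spec_build_header_names_py; infer_instance

-- ===== CLAIM (what is proved, stated in full; the proofs are below) =====
def Claim_equal_build_header_names_py : Prop := ∀ (header_row : List String) (data_rows : List (Int × List String)), Dom_build_header_names_py header_row data_rows → Spec_build_header_names_py header_row data_rows (build_header_names_py header_row data_rows)

-- ===== LEMMAS AND PROOFS =====
-- proof-only helpers: base name of column i (0-based), the base-name list, A's emitted name
def hnBase (hr : List String) (i : Nat) : String :=
  let s : String := if i < hr.length then PySem.Str.strip (hr.getD i "") else ""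
  if s = "" then "col_" ++ PySem.Int.toStr ((i : Int) + 1) else s

def hnBases (hr : List String) (n : Nat) : List String := (List.range n).map (hnBase hr)

def hnName (hr : List String) (i : Nat) : String :=
  let b := hnBase hr i
  let c := (hnBases hr i).count b
  if c = 0 then b else b ++ "_" ++ PySem.Int.toStr ((c : Int) + 1)

-- A's loop body, named so the induction can speak about it
def hnStep (header_row : List String) :
    List String × PySem.Dict String Int → Int → List String × PySem.Dict String Int :=
  fun st column_index =>
    let raw_header : String :=
      if column_index ≤ PySem.List.len header_row then
        PySem.Str.strip (PySem.List.pyGetD header_row (column_index - 1) "")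
      else ""
    let header_name : String :=
      if raw_header = "" then "col_" ++ PySem.Int.toStr column_index else raw_header
    let duplicate_index : Int := st.2.getD header_name 0
    let header_name2 : String :=
      if duplicate_index ≠ 0 then header_name ++ "_" ++ PySem.Int.toStr (duplicate_index + 1)
      else header_name
    ((st.1 ++ [header_name2]),
      st.2.insert (if raw_header = "" then "col_" ++ PySem.Int.toStr column_index else raw_header)
        (duplicate_index + 1))

theorem foldl_max_cast (l : List (Int × List String)) (a : Nat) :
    (l.map (fun p => ((p.2.length : Nat) : Int))).foldl max ((a : Nat) : Int)
      = ((l.foldl (fun m p => max m p.2.length) a : Nat) : Int) := by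
  induction l generalizing a with
  | nil => rfl
  | cons x t ih =>
    simp only [List.map_cons, List.foldl_cons]
    rw [← Nat.cast_max]
    exact ih _

theorem hnStep_eval (hr : List String) (j : Nat) (names : List String) (d : PySem.Dict String Int)
    (hd : ∀ b, d.getD b 0 = ((hnBases hr j).count b : Int)) :
    hnStep hr (names, d) (1 + (j : Int))
      = (names ++ [hnName hr j],
         d.insert (hnBase hr j) (((hnBases hr j).count (hnBase hr j) : Int) + 1)) := by
  have hidx : (1 + (j : Int)) - 1 = (j : Int) := by ring
  have hiff : (1 + (j : Int) ≤ (hr.length : Int)) ↔ j < hr.length := by omega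
  have hb : (if (1 + (j : Int)) ≤ PySem.List.len hr then
        PySem.Str.strip (PySem.List.pyGetD hr ((1 + (j : Int)) - 1) "") else "")
      = (if j < hr.length then PySem.Str.strip (hr.getD j "") else "") := by
    rw [hidx]
    simp only [PySem.List.pyGetD_natCast, PySem.List.len_eq]
    by_cases h : j < hr.length
    · rw [if_pos (hiff.mpr h), if_pos h]
    · rw [if_neg (fun hh => h (hiff.mp hh)), if_neg h]
  have htos : PySem.Int.toStr (1 + (j : Int)) = PySem.Int.toStr ((j : Int) + 1) := by
    rw [add_comm]
  have hbase : (if (if (1 + (j : Int)) ≤ PySem.List.len hr then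
        PySem.Str.strip (PySem.List.pyGetD hr ((1 + (j : Int)) - 1) "") else "") = "" then
        "col_" ++ PySem.Int.toStr (1 + (j : Int))
      else (if (1 + (j : Int)) ≤ PySem.List.len hr then
        PySem.Str.strip (PySem.List.pyGetD hr ((1 + (j : Int)) - 1) "") else ""))
      = hnBase hr j := by
    rw [hb, htos]; rfl
  simp only [hnStep, hbase, hd]
  have hname : (if ((hnBases hr j).count (hnBase hr j) : Int) ≠ 0 then
        hnBase hr j ++ "_" ++ PySem.Int.toStr (((hnBases hr j).count (hnBase hr j) : Int) + 1)
      else hnBase hr j) = hnName hr j := by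
    simp only [hnName]
    by_cases hc : (hnBases hr j).count (hnBase hr j) = 0
    · simp [hc]
    · rw [if_pos (by exact_mod_cast hc), if_neg hc]
  rw [hname]

theorem loopA (hr : List String) (j : Nat) :
    ((List.range j).map (fun k => ((1 : Int) + (k : Nat)))).foldl (hnStep hr) ([], PySem.Dict.empty)
      = ((List.range j).map (hnName hr),
         ((List.range j).map (hnBase hr)).foldl
           (fun d x => d.insert x (d.getD x 0 + 1)) PySem.Dict.empty) := by
  induction j with
  | zero => rfl
  | succ n ih =>
    rw [List.range_succ, List.map_append, List.map_append, List.map_append,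
        List.foldl_append, List.foldl_append, ih]
    simp only [List.map_cons, List.map_nil, List.foldl_cons, List.foldl_nil]
    rw [hnStep_eval hr n _ _ (fun b => by
      rw [PySem.Dict.getD_foldl_insert_add_one]
      simp [hnBases])]
    congr 2
    rw [PySem.Dict.getD_foldl_insert_add_one]
    simp [hnBases]

theorem portA_eq (hr : List String) (dr : List (Int × List String)) :
    build_header_names_py hr dr
      = (List.range (dr.foldl (fun m p => max m p.2.length) hr.length)).map (hnName hr) := by
  set N : Nat := dr.foldl (fun m p => max m p.2.length) hr.length with hN
  show ((PySem.List.pyRange 1 _ 1).foldl (hnStep hr) ([], PySem.Dict.empty)).1 = _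
  have hmax : (PySem.List.max? (PySem.List.len hr :: dr.map (fun p => PySem.List.len p.2))
      (fun x => x)).getD 0 = (N : Int) := by
    rw [PySem.List.max?_id_cons]
    simp only [Option.getD_some, PySem.List.len_eq]
    exact foldl_max_cast dr hr.length
  rw [hmax, PySem.List.pyRange_one]
  have hto : ((N : Int) + 1 - 1).toNat = N := by omega
  rw [hto, loopA]

-- ---- B side ----

-- the (0-based) columns whose base name is b, in increasing order
def hnIdx (hr : List String) (n : Nat) (b : String) : List Nat :=
  (List.range n).filter (fun j => hnBase hr j == b)

-- the sorted target: (index, final name) pairs in column order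
def hnPairs (hr : List String) (n : Nat) : List (Int × String) :=
  (List.range n).map (fun (j : Nat) => ((j : Int), hnName hr j))

theorem countP_range_filter (p : Nat → Bool) :
    ∀ (n k : Nat) (h : k < ((List.range n).filter p).length),
      (List.range (((List.range n).filter p)[k]'h)).countP p = k := by
  intro n
  induction n with
  | zero => intro k h; simp at h
  | succ m ih =>
    intro k h
    have hsplit : (List.range (m + 1)).filter p = (List.range m).filter p ++ List.filter p [m] := by
      rw [List.range_succ, List.filter_append]
    by_cases hk : k < ((List.range m).filter p).length
    · have he : ((List.range (m + 1)).filter p)[k]'h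
          = ((List.range m).filter p)[k]'hk := by
        rw [List.getElem_of_eq hsplit h]
        exact List.getElem_append_left hk
      rw [he]; exact ih k hk
    · have hlen : k < ((List.range m).filter p).length + (List.filter p [m]).length := by
        have h2 := h
        rw [hsplit, List.length_append] at h2
        exact h2
      have hpm : p m = true := by
        by_contra hpm
        have hnil : List.filter p [m] = [] := by
          simp [List.filter, Bool.eq_false_iff.mpr hpm]
        rw [hnil] at hlen; simp at hlen; omega
      have hfm : List.filter p [m] = [m] := by simp [List.filter, hpm]
      have hkeq : k = ((List.range m).filter p).length := by
        rw [hfm] at hlen; simp at hlen; omega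
      have he : ((List.range (m + 1)).filter p)[k]'h = m := by
        rw [List.getElem_of_eq hsplit h]
        rw [List.getElem_append_right (by omega)]
        simp [hfm, hkeq]
      rw [he, List.countP_eq_length_filter, hkeq]

theorem grouping_perm {α κ : Type} [DecidableEq κ] (g : α → κ) :
    ∀ (ks : List κ) (L : List α), ks.Nodup → (∀ x ∈ L, g x ∈ ks) →
      (ks.flatMap (fun b => L.filter (fun x => g x == b))).Perm L := by
  intro ks
  induction ks with
  | nil =>
    intro L _ hall
    have : L = [] := List.eq_nil_iff_forall_not_mem.mpr (fun x hx => by simpa using hall x hx)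
    simp [this]
  | cons b ks ih =>
    intro L hnd hall
    rw [List.flatMap_cons]
    set L' : List α := L.filter (fun x => !(g x == b)) with hL'
    have hrest : ∀ c ∈ ks, L.filter (fun x => g x == c) = L'.filter (fun x => g x == c) := by
      intro c hc
      have hcb : c ≠ b := fun hh => (List.nodup_cons.mp hnd).1 (hh ▸ hc)
      rw [hL', List.filter_filter]
      apply List.filter_congr
      intro x _
      by_cases hgx : g x = c
      · simp [hgx, hcb]
      · simp [hgx]
    have hmapeq : ks.flatMap (fun c => L.filter (fun x => g x == c))
        = ks.flatMap (fun c => L'.filter (fun x => g x == c)) :=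
      List.flatMap_congr hrest
    rw [hmapeq]
    have hperm' : (ks.flatMap (fun c => L'.filter (fun x => g x == c))).Perm L' := by
      apply ih
      · exact (List.nodup_cons.mp hnd).2
      · intro x hx
        have hxL : x ∈ L := List.mem_of_mem_filter hx
        have hne : ¬ (g x = b) := by
          have := List.of_mem_filter hx
          simpa using this
        rcases List.mem_cons.mp (hall x hxL) with hcase | hcase
        · exact absurd hcase hne
        · exact hcase
    exact (hperm'.append_left (L.filter (fun x => g x == b))).trans
      (List.filter_append_perm (fun x => g x == b) L)

theorem enum_bases (hr : List String) (n : Nat) :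
    PySem.List.enumerate (hnBases hr n) 0
      = (List.range n).map (fun (j : Nat) => ((j : Int), hnBase hr j)) := by
  apply List.ext_getElem
  · simp [PySem.List.length_enumerate, hnBases]
  · intro k h1 h2
    have hk : k < n := by simpa using h2
    simp [PySem.List.getElem_enumerate, hnBases]

-- the per-bucket renaming equals the target pairs of that bucket
theorem bucket_eq (hr : List String) (n : Nat) (b : String) :
    (PySem.List.enumerate ((hnIdx hr n b).map (fun (j : Nat) => (j : Int))) 0).map (fun q =>
        (q.2, if q.1 = 0 then b else b ++ "_" ++ PySem.Int.toStr (q.1 + 1)))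
      = (hnIdx hr n b).map (fun (j : Nat) => ((j : Int), hnName hr j)) := by
  apply List.ext_getElem
  · simp [PySem.List.length_enumerate]
  · intro k h1 h2
    have hk : k < (hnIdx hr n b).length := by
      simpa [PySem.List.length_enumerate] using h2
    have hget : ((hnIdx hr n b).map (fun (j : Nat) => (j : Int)))[k]'(by simpa using hk)
        = (((hnIdx hr n b)[k]'hk : Nat) : Int) := by simp
    have hmem : (hnIdx hr n b)[k]'hk ∈ hnIdx hr n b := List.getElem_mem hk
    have hbase : hnBase hr ((hnIdx hr n b)[k]'hk) = b := by
      have := List.of_mem_filter hmem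
      simpa using this
    have hcount : (List.range ((hnIdx hr n b)[k]'hk)).countP (fun j => hnBase hr j == b) = k :=
      countP_range_filter (fun j => hnBase hr j == b) n k hk
    have hname : hnName hr ((hnIdx hr n b)[k]'hk)
        = if k = 0 then b else b ++ "_" ++ PySem.Int.toStr ((k : Int) + 1) := by
      simp only [hnName, hnBases, hbase]
      have hc : ((List.range ((hnIdx hr n b)[k]'hk)).map (hnBase hr)).count b = k := by
        rw [List.count_eq_countP, List.countP_map]
        simpa using hcount
      rw [hc]
    simp only [List.getElem_map, PySem.List.getElem_enumerate, hget, zero_add]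
    rw [hname]
    by_cases hk0 : k = 0
    · simp [hk0]
    · have : ¬ ((k : Int) = 0) := by exact_mod_cast hk0
      simp [hk0]

theorem hnPairs_pairwise (hr : List String) (n : Nat) :
    (hnPairs hr n).Pairwise (fun a b => a.1 < b.1) := by
  unfold hnPairs
  rw [List.pairwise_map]
  have h0 : List.Pairwise (fun a b : Nat => a < b) (List.range n) := List.pairwise_lt_range
  exact h0.imp (fun {a b} h => show ((a : Nat) : Int) < ((b : Nat) : Int) by exact_mod_cast h)

theorem portB_eq (hr : List String) (dr : List (Int × List String)) :
    build_header_names_py_alt hr dr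
      = (List.range (dr.foldl (fun m p => max m p.2.length) hr.length)).map (hnName hr) := by
  set N : Nat := dr.foldl (fun m p => max m p.2.length) hr.length with hN
  have hmax : (PySem.List.max? (PySem.List.len hr :: dr.map (fun p => PySem.List.len p.2))
      (fun x => x)).getD 0 = (N : Int) := by
    rw [PySem.List.max?_id_cons]
    simp only [Option.getD_some, PySem.List.len_eq]
    exact foldl_max_cast dr hr.length
  unfold build_header_names_py_alt
  simp only [hmax]
  -- the base-name list is hnBases hr N
  have hbases : (PySem.List.pyRange 0 ((N : Nat) : Int) 1).map (fun i =>
      let s : String :=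
        if i < PySem.List.len hr then PySem.Str.strip (PySem.List.pyGetD hr i "") else ""
      if s = "" then "col_" ++ PySem.Int.toStr (i + 1) else s) = hnBases hr N := by
    rw [PySem.List.pyRange_zero_natCast, List.map_map]
    apply List.map_congr_left
    intro j hj
    simp only [Function.comp, hnBase, PySem.List.pyGetD_natCast, PySem.List.len_eq, Nat.cast_lt]
  rw [hbases]
  -- the groups dict
  set E := PySem.List.enumerate (hnBases hr N) 0 with hE
  set S : List (String × Int) := E.map (fun p => (p.2, p.1)) with hS
  have hfold : E.foldl (fun d p => d.modify p.2 [] (fun l => l ++ [p.1])) PySem.Dict.empty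
      = S.foldl (fun d p => d.modify p.1 [] (fun l => l ++ [p.2])) PySem.Dict.empty := by
    rw [hS, List.foldl_map]
  rw [hfold]
  set G := S.foldl (fun d p => d.modify p.1 [] (fun l => l ++ [p.2])) PySem.Dict.empty with hG
  have hnodup : G.keys.Nodup := by
    rw [hG]
    exact PySem.Dict.nodup_keys_foldl_modify_key S (fun p => p.1) [] (fun _ p => (fun l => l ++ [p.2]))
      PySem.Dict.empty (by simp)
  have hkeys : G.keys = PySem.Set.ofList (hnBases hr N) := by
    rw [hG, PySem.Dict.keys_foldl_modify_key]
    have : S.map (fun p => p.1) = hnBases hr N := by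
      rw [hS, List.map_map]
      have : (fun (p : Int × String) => (p.2, p.1).1) = (fun p => p.2) := rfl
      rw [show ((fun (p : String × Int) => p.1) ∘ (fun (p : Int × String) => (p.2, p.1)))
          = (fun (p : Int × String) => p.2) from rfl]
      exact PySem.List.map_snd_enumerate _ _
    rw [this]
    simp [PySem.Dict.keys_empty, PySem.Set.update, PySem.Set.ofList_eq_foldl]
  have hgetD : ∀ b, G.getD b [] = (hnIdx hr N b).map (fun (j : Nat) => (j : Int)) := by
    intro b
    rw [hG, PySem.Dict.getD_foldl_modify_append]
    rw [PySem.Dict.getD_empty]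
    rw [hS, hE, enum_bases]
    rw [List.map_map, List.filter_map, List.map_map]
    rfl
  -- named is a permutation of the sorted target
  have hitems : G.items = G.keys.map (fun k => (k, G.getD k [])) :=
    PySem.Dict.items_eq_map_keys G hnodup []
  have hnamed : G.items.flatMap (fun bp =>
      (PySem.List.enumerate bp.2 0).map (fun q =>
        (q.2, if q.1 = 0 then bp.1 else bp.1 ++ "_" ++ PySem.Int.toStr (q.1 + 1))))
      = (PySem.Set.ofList (hnBases hr N)).flatMap (fun b =>
          (hnIdx hr N b).map (fun (j : Nat) => ((j : Int), hnName hr j))) := by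
    rw [hitems, hkeys, List.flatMap_map]
    apply List.flatMap_congr
    intro b _
    simp only [hgetD b]
    exact bucket_eq hr N b
  rw [hnamed]
  -- permutation with the target pairs
  have hfiltereq : ∀ b, (hnPairs hr N).filter (fun x => hnBase hr x.1.toNat == b)
      = (hnIdx hr N b).map (fun (j : Nat) => ((j : Int), hnName hr j)) := by
    intro b
    unfold hnPairs hnIdx
    rw [List.filter_map]
    rfl
  have hperm : ((PySem.Set.ofList (hnBases hr N)).flatMap (fun b =>
      (hnIdx hr N b).map (fun (j : Nat) => ((j : Int), hnName hr j)))).Perm (hnPairs hr N) := by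
    have := grouping_perm (fun (x : Int × String) => hnBase hr x.1.toNat)
      (PySem.Set.ofList (hnBases hr N)) (hnPairs hr N)
      (PySem.Set.nodup_ofList _)
      (by
        intro x hx
        unfold hnPairs at hx
        rcases List.mem_map.mp hx with ⟨j, hj, rfl⟩
        have : hnBase hr j ∈ hnBases hr N := by
          unfold hnBases
          exact List.mem_map.mpr ⟨j, hj, rfl⟩
        simpa [PySem.Set.mem_ofList] using this)
    have hcong : (PySem.Set.ofList (hnBases hr N)).flatMap (fun b =>
        (hnPairs hr N).filter (fun x => hnBase hr x.1.toNat == b))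
        = (PySem.Set.ofList (hnBases hr N)).flatMap (fun b =>
          (hnIdx hr N b).map (fun (j : Nat) => ((j : Int), hnName hr j))) := by
      apply List.flatMap_congr
      intro b _
      exact hfiltereq b
    rw [hcong] at this
    exact this
  have hsorted : PySem.List.sorted ((PySem.Set.ofList (hnBases hr N)).flatMap (fun b =>
      (hnIdx hr N b).map (fun (j : Nat) => ((j : Int), hnName hr j)))) (fun pair => pair.1) false
      = hnPairs hr N :=
    PySem.List.sorted_eq_of_perm_of_pairwise_lt _ _ _ hperm.symm (hnPairs_pairwise hr N)
  rw [hsorted]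
  unfold hnPairs
  rw [List.map_map]
  rfl

-- ===== VERDICT (by name: the statement is the Claim_ definition above) =====
theorem build_header_names_py_spec : Claim_equal_build_header_names_py := by
  intro hr dr _
  show build_header_names_py hr dr = build_header_names_py_alt hr dr
  rw [portA_eq, portB_eq]
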